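-- pv_equiv track=rewrite | github.com/opendatazurich/opendatazurich.github.io | automation/immo_ginto_zugaenglichkeit/ginto_api.py | extract_default_ratings
-- ===== SOURCE A (Python) =====
-- from typing import Any, Dict, List, Optional
--
-- def extract_default_ratings(ratings: Any) -> Dict[str, Optional[str]]:
--     """
--     Entpackt accessibilityInfo.defaultRatings in flache Spalten.
--     """
--     rating_types = ["toilet", "parking", "visual", "cognitive", "inductive"]
--     fields = ["descriptionDE", "iconUrl"]
--
--     result: Dict[str, Optional[str]] = {
--         f"{rtype}_{field}": None
--         for rtype in rating_types + ["general"]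
--         for field in fields
--     }
--
--     if not isinstance(ratings, list):
--         return result
--
--     for item in ratings:
--         key = (item.get("key") or "").lower()
--         matched = False
--
--         for rtype in rating_types:
--             if rtype in key:
--                 for field in fields:
--                     result[f"{rtype}_{field}"] = item.get(field)
--                 matched = True
--                 break
--
--         if not matched:
--             for field in fields:
--                 result[f"general_{field}"] = item.get(field)
--
--     return result
-- ===== SOURCE B (Python) =====
-- from typing import Any, Dict, List, Optional
--
-- def extract_default_ratings(ratings: Any) -> Dict[str, Optional[str]]:
--     """
--     Entpackt accessibilityInfo.defaultRatings in flache Spalten.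
--     Two-phase version: classify items into categories first, then populate columns.
--     """
--     rating_types = ["toilet", "parking", "visual", "cognitive", "inductive"]
--     fields = ["descriptionDE", "iconUrl"]
--
--     result: Dict[str, Optional[str]] = {
--         f"{rtype}_{field}": None
--         for rtype in rating_types + ["general"]
--         for field in fields
--     }
--
--     if not isinstance(ratings, list):
--         return result
--
--     # Phase 1: index items by category; a later item overwrites an earlier one.
--     chosen: Dict[str, Any] = {}
--     for item in ratings:
--         key = (item.get("key") or "").lower()
--         category = next((r for r in rating_types if r in key), "general")
--         chosen[category] = item
--
--     # Phase 2: fill the columns from each category's chosen representative.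
--     for category, item in chosen.items():
--         for field in fields:
--             result[f"{category}_{field}"] = item.get(field)
--
--     return result
-- ===== Notes on version B (the rewrite author's own statement) =====
-- stated objective: alternative
-- what changed: B replaces A's single loop that writes result columns inline (with a matched-flag break loop) by two distinct phases: first an index dict mapping category -> last item classified into it, then a separate pass populating the fixed None-filled columns from that index.
import Mathlib
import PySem

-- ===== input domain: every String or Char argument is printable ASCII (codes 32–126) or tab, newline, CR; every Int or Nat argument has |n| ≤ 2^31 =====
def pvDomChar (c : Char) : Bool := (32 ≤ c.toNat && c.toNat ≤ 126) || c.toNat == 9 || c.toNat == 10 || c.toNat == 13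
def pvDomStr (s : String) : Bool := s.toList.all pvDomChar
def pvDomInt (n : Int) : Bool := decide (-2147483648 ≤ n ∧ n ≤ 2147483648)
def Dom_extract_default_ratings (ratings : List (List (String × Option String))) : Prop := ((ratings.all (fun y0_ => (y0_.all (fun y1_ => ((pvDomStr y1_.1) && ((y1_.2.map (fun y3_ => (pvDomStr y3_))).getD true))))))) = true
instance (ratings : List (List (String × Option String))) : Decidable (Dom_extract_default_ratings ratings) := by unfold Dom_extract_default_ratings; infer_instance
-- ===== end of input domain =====

-- B splits A's single inline loop into two phases: classify each item into a category dict
-- (last item per category wins), then populate the fixed columns from that dict (objective: alternative decomposition).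

-- ===== PORT A =====
def pvRatingTypes : List String := ["toilet", "parking", "visual", "cognitive", "inductive"]
def pvFields : List String := ["descriptionDE", "iconUrl"]

-- the dict comprehension {f"{rtype}_{field}": None for rtype in rating_types + ["general"] for field in fields}
-- (textually identical in A and B, so shared)
def pvBase : PySem.Dict String (Option String) :=
  (pvRatingTypes ++ ["general"]).foldl
    (fun d rtype => pvFields.foldl (fun d field => d.insert (rtype ++ "_" ++ field) none) d)
    PySem.Dict.empty

-- item.get(field)  (value type Optional[str]: a stored None and a missing key both give None)
def pvGet (item : List (String × Option String)) (field : String) : Option String :=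
  ((PySem.Dict.mk item).get? field).getD none

-- (item.get("key") or "").lower()
def pvKeyLower (item : List (String × Option String)) : String :=
  PySem.Str.lower ((((PySem.Dict.mk item).get? "key").getD none).getD "")

def extract_default_ratings (ratings : List (List (String × Option String))) : List (String × Option String) :=
  -- the `isinstance(ratings, list)` guard is always true under the typed domain
  (ratings.foldl
    (fun result item =>
      let key := pvKeyLower item
      -- `for rtype in rating_types: if rtype in key: … break` = first match, else the general branch
      match pvRatingTypes.find? (fun rtype => PySem.Str.isIn rtype key) with
      | some rtype =>
          pvFields.foldl (fun d field => d.insert (rtype ++ "_" ++ field) (pvGet item field)) result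
      | none =>
          pvFields.foldl (fun d field => d.insert ("general" ++ "_" ++ field) (pvGet item field)) result)
    pvBase).items

-- ===== PORT B =====
-- next((r for r in rating_types if r in key), "general")
def pvCategory (item : List (String × Option String)) : String :=
  (pvRatingTypes.find? (fun rtype => PySem.Str.isIn rtype (pvKeyLower item))).getD "general"

-- phase 1: chosen[category] = item  (last wins)
def pvChosen (ratings : List (List (String × Option String))) :
    PySem.Dict String (List (String × Option String)) :=
  ratings.foldl (fun chosen item => chosen.insert (pvCategory item) item) PySem.Dict.empty

def extract_default_ratings_alt (ratings : List (List (String × Option String))) : List (String × Option String) :=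
  -- phase 2: for category, item in chosen.items(): fill the two columns
  ((pvChosen ratings).items.foldl
    (fun result ci =>
      pvFields.foldl (fun d field => d.insert (ci.1 ++ "_" ++ field) (pvGet ci.2 field)) result)
    pvBase).items

-- ===== PRECONDITION & SPEC =====
def Spec_extract_default_ratings (ratings : List (List (String × Option String))) (out : List (String × Option String)) : Prop := out = extract_default_ratings_alt ratings
instance (ratings : List (List (String × Option String))) (out : List (String × Option String)) : Decidable (Spec_extract_default_ratings ratings out) := by unfold Spec_extract_default_ratings; infer_instance

-- ===== CLAIM (what is proved, stated in full; the proofs are below) =====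
def Claim_equal_extract_default_ratings : Prop := ∀ (ratings : List (List (String × Option String))), Dom_extract_default_ratings ratings → Spec_extract_default_ratings ratings (extract_default_ratings ratings)

-- ===== LEMMAS AND PROOFS =====

-- the six categories (columns of the result)
def pvCats : List String := ["toilet", "parking", "visual", "cognitive", "inductive", "general"]

-- the result dict, abstracted over the value of each (category, field) column
def pvGrid (g : String → String → Option String) : PySem.Dict String (Option String) :=
  PySem.Dict.mk
    [("toilet_descriptionDE", g "toilet" "descriptionDE"), ("toilet_iconUrl", g "toilet" "iconUrl"),
     ("parking_descriptionDE", g "parking" "descriptionDE"), ("parking_iconUrl", g "parking" "iconUrl"),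
     ("visual_descriptionDE", g "visual" "descriptionDE"), ("visual_iconUrl", g "visual" "iconUrl"),
     ("cognitive_descriptionDE", g "cognitive" "descriptionDE"), ("cognitive_iconUrl", g "cognitive" "iconUrl"),
     ("inductive_descriptionDE", g "inductive" "descriptionDE"), ("inductive_iconUrl", g "inductive" "iconUrl"),
     ("general_descriptionDE", g "general" "descriptionDE"), ("general_iconUrl", g "general" "iconUrl")]

theorem pvBase_eq : pvBase = pvGrid (fun _ _ => none) := by decide

theorem pvCategory_mem (item : List (String × Option String)) : pvCategory item ∈ pvCats := by
  unfold pvCategory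
  cases h : pvRatingTypes.find? (fun rtype => PySem.Str.isIn rtype (pvKeyLower item)) with
  | none => decide
  | some r =>
    have hr := List.mem_of_find?_eq_some h
    fin_cases hr <;> decide

-- writing both columns of one category on a grid updates that category's column function
theorem pvWrite (c : String) (hc : c ∈ pvCats) (v : String → Option String)
    (g : String → String → Option String) :
    pvFields.foldl (fun d field => d.insert (c ++ "_" ++ field) (v field)) (pvGrid g)
      = pvGrid (fun c' f' => if c' = c then v f' else g c' f') := by
  fin_cases hc <;>
    simp [pvFields, pvGrid, PySem.Dict.insert, List.foldl]

-- the column-function update one item performs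
def pvUpd (g : String → String → Option String) (item : List (String × Option String)) :
    String → String → Option String :=
  fun c f => if c = pvCategory item then pvGet item f else g c f

theorem pvStepA (g : String → String → Option String) (item : List (String × Option String)) :
    (let key := pvKeyLower item
     match pvRatingTypes.find? (fun rtype => PySem.Str.isIn rtype key) with
     | some rtype =>
         pvFields.foldl (fun d field => d.insert (rtype ++ "_" ++ field) (pvGet item field)) (pvGrid g)
     | none =>
         pvFields.foldl (fun d field => d.insert ("general" ++ "_" ++ field) (pvGet item field)) (pvGrid g))
      = pvGrid (pvUpd g item) := by
  show (match pvRatingTypes.find? (fun rtype => PySem.Str.isIn rtype (pvKeyLower item)) with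
     | some rtype =>
         pvFields.foldl (fun d field => d.insert (rtype ++ "_" ++ field) (pvGet item field)) (pvGrid g)
     | none =>
         pvFields.foldl (fun d field => d.insert ("general" ++ "_" ++ field) (pvGet item field)) (pvGrid g))
      = pvGrid (pvUpd g item)
  cases h : pvRatingTypes.find? (fun rtype => PySem.Str.isIn rtype (pvKeyLower item)) with
  | some r =>
    have hr : r ∈ pvCats := by
      have := List.mem_of_find?_eq_some h
      fin_cases this <;> decide
    have hcat : pvCategory item = r := by unfold pvCategory; rw [h]; rfl
    show pvFields.foldl (fun d field => d.insert (r ++ "_" ++ field) (pvGet item field)) (pvGrid g)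
      = pvGrid (pvUpd g item)
    rw [pvWrite r hr (fun field => pvGet item field) g]
    unfold pvUpd; rw [hcat]
  | none =>
    have hcat : pvCategory item = "general" := by unfold pvCategory; rw [h]; rfl
    show pvFields.foldl (fun d field => d.insert ("general" ++ "_" ++ field) (pvGet item field)) (pvGrid g)
      = pvGrid (pvUpd g item)
    rw [pvWrite "general" (by decide) (fun field => pvGet item field) g]
    unfold pvUpd; rw [hcat]

theorem pvLoopA (xs : List (List (String × Option String))) :
    ∀ g, xs.foldl
      (fun result item =>
        let key := pvKeyLower item
        match pvRatingTypes.find? (fun rtype => PySem.Str.isIn rtype key) with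
        | some rtype =>
            pvFields.foldl (fun d field => d.insert (rtype ++ "_" ++ field) (pvGet item field)) result
        | none =>
            pvFields.foldl (fun d field => d.insert ("general" ++ "_" ++ field) (pvGet item field)) result)
      (pvGrid g) = pvGrid (xs.foldl pvUpd g) := by
  induction xs with
  | nil => intro g; rfl
  | cons x xs ih =>
    intro g
    simp only [List.foldl_cons]
    rw [pvStepA g x, ih (pvUpd g x)]

theorem pvLoopB (l : List (String × List (String × Option String))) :
    ∀ g, (∀ p ∈ l, p.1 ∈ pvCats) →
      l.foldl
        (fun result ci =>
          pvFields.foldl (fun d field => d.insert (ci.1 ++ "_" ++ field) (pvGet ci.2 field)) result)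
        (pvGrid g)
      = pvGrid (l.foldl (fun g ci => fun c f => if c = ci.1 then pvGet ci.2 f else g c f) g) := by
  induction l with
  | nil => intro g _; rfl
  | cons p l ih =>
    intro g hmem
    simp only [List.foldl_cons]
    rw [pvWrite p.1 (hmem p (by simp)) (fun field => pvGet p.2 field) g]
    exact ih _ (fun q hq => hmem q (by simp [hq]))

-- the left fold of per-item updates reads off the LAST item of each category
theorem pvFoldUpd (xs : List (List (String × Option String))) :
    ∀ g c f, (xs.foldl pvUpd g) c f
      = match xs.reverse.find? (fun it => pvCategory it == c) with
        | some it => pvGet it f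
        | none => g c f := by
  induction xs with
  | nil => intro g c f; rfl
  | cons x xs ih =>
    intro g c f
    simp only [List.foldl_cons, List.reverse_cons, List.find?_append]
    rw [ih (pvUpd g x) c f]
    cases xs.reverse.find? (fun it => pvCategory it == c) with
    | some it => rfl
    | none =>
      simp only [Option.or]
      unfold pvUpd
      by_cases hc : c = pvCategory x
      · simp [List.find?, hc]
      · have : (pvCategory x == c) = false := by
          simp [Ne.symm hc]
        simp [List.find?, this, hc]

-- the chosen dict holds, per category, the last item classified into it
theorem pvChosenGet (xs : List (List (String × Option String))) :
    ∀ (d : PySem.Dict String (List (String × Option String))) (c : String),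
      (xs.foldl (fun chosen item => chosen.insert (pvCategory item) item) d).get? c
        = match xs.reverse.find? (fun it => pvCategory it == c) with
          | some it => some it
          | none => d.get? c := by
  induction xs with
  | nil => intro d c; rfl
  | cons x xs ih =>
    intro d c
    simp only [List.foldl_cons, List.reverse_cons, List.find?_append]
    rw [ih (d.insert (pvCategory x) x) c]
    cases xs.reverse.find? (fun it => pvCategory it == c) with
    | some it => rfl
    | none =>
      simp only [Option.or]
      by_cases hc : c = pvCategory x
      · subst hc
        simp [List.find?, PySem.Dict.get?_insert_self]
      · have hbe : (pvCategory x == c) = false := by simp [Ne.symm hc]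
        simp [List.find?, hbe, PySem.Dict.get?_insert_of_ne d x hc]

theorem pvChosenKeysNodup (xs : List (List (String × Option String))) :
    ∀ (d : PySem.Dict String (List (String × Option String))), d.keys.Nodup →
      (xs.foldl (fun chosen item => chosen.insert (pvCategory item) item) d).keys.Nodup := by
  induction xs with
  | nil => exact fun d h => h
  | cons x xs ih =>
    intro d h
    exact ih _ (PySem.Dict.nodup_keys_insert _ _ _ h)

theorem pvChosenKeysMem (xs : List (List (String × Option String))) :
    ∀ (d : PySem.Dict String (List (String × Option String))),
      (∀ k ∈ d.keys, k ∈ pvCats) →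
      ∀ k ∈ (xs.foldl (fun chosen item => chosen.insert (pvCategory item) item) d).keys, k ∈ pvCats := by
  induction xs with
  | nil => exact fun d h => h
  | cons x xs ih =>
    intro d h
    refine ih _ ?_
    intro k hk
    rcases (PySem.Dict.mem_keys_insert _ _ _ _).mp hk with h1 | h2
    · subst h1; exact pvCategory_mem x
    · exact h k h2

-- reading the fold over a nodup association list is a dict lookup
theorem pvFoldPairs (l : List (String × List (String × Option String))) :
    ∀ g c f, (l.map Prod.fst).Nodup →
      (l.foldl (fun g ci => fun c f => if c = ci.1 then pvGet ci.2 f else g c f) g) c f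
        = match (PySem.Dict.mk l).get? c with
          | some it => pvGet it f
          | none => g c f := by
  induction l with
  | nil => intro g c f _; rfl
  | cons p l ih =>
    obtain ⟨k, v⟩ := p
    intro g c f hnd
    simp only [List.map_cons, List.nodup_cons] at hnd
    simp only [List.foldl_cons]
    rw [ih _ c f hnd.2]
    rw [PySem.Dict.get?_mk_cons]
    by_cases hc : k = c
    · subst hc
      have hnone : (PySem.Dict.mk l).get? k = none := by
        rw [PySem.Dict.get?_eq_none_iff_not_mem_keys]
        simpa using hnd.1
      simp [hnone]
    · have hbe : (k == c) = false := by simp [hc]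
      simp only [hbe]
      cases (PySem.Dict.mk l).get? c with
      | some it => rfl
      | none => simp [Ne.symm hc]

-- ===== VERDICT (by name: the statement is the Claim_ definition above) =====
theorem extract_default_ratings_spec : Claim_equal_extract_default_ratings := by
  intro ratings _
  unfold Spec_extract_default_ratings extract_default_ratings extract_default_ratings_alt
  rw [pvBase_eq, pvLoopA ratings (fun _ _ => none)]
  have hmem : ∀ p ∈ (pvChosen ratings).items, p.1 ∈ pvCats := by
    intro p hp
    exact pvChosenKeysMem ratings PySem.Dict.empty
      (by intro k hk; simp [PySem.Dict.empty, PySem.Dict.keys] at hk)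
      p.1 (List.mem_map_of_mem hp)
  rw [pvLoopB (pvChosen ratings).items (fun _ _ => none) hmem]
  have hnd : ((pvChosen ratings).items.map Prod.fst).Nodup :=
    pvChosenKeysNodup ratings PySem.Dict.empty (by simp [PySem.Dict.empty, PySem.Dict.keys])
  have hfun : List.foldl pvUpd (fun _ _ => none) ratings
      = List.foldl (fun g ci c f => if c = ci.1 then pvGet ci.2 f else g c f)
          (fun _ _ => none) (pvChosen ratings).items := by
    funext c f
    rw [pvFoldUpd ratings (fun _ _ => none) c f,
        pvFoldPairs (pvChosen ratings).items (fun _ _ => none) c f hnd]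
    rw [show (PySem.Dict.mk (pvChosen ratings).items) = pvChosen ratings from rfl]
    unfold pvChosen
    rw [pvChosenGet ratings PySem.Dict.empty c]
    cases ratings.reverse.find? (fun it => pvCategory it == c) with
    | some it => rfl
    | none => rfl
  rw [hfun]
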